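-- pv_equiv track=rewrite | github.com/TheoVangheluwe/Sprouts | Game/utils/move_verification.py | parse_boundaries
-- ===== SOURCE A (Python) =====
-- def parse_boundaries(chain):
--     boundaries = []
--     current_boundary = []
--
--     for char in chain:
--         if char.isalnum():
--             current_boundary.append(char)
--         elif char in {'.', '}'}:
--             if current_boundary:
--                 boundaries.append(current_boundary)
--                 current_boundary = []
--         elif char == '!':
--             break  # fin de la position
--
--     return boundaries
-- ===== SOURCE B (Python) =====
-- def parse_boundaries(chain):
--     prefix = chain.split('!')[0]
--     segments = prefix.replace('}', '.').split('.')
--     groups = [[c for c in seg if c.isalnum()] for seg in segments[:-1]]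
--     return [g for g in groups if g]
-- ===== Notes on version B (the rewrite author's own statement) =====
-- stated objective: simpler
-- what changed: Replaced the char-by-char state machine (buffer + flush-on-delimiter + break) by a split-based pipeline: truncate at the first '!', split on '.'/'}' delimiters, drop the never-flushed last segment, and keep the non-empty alnum-filtered groups.
import Mathlib
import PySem

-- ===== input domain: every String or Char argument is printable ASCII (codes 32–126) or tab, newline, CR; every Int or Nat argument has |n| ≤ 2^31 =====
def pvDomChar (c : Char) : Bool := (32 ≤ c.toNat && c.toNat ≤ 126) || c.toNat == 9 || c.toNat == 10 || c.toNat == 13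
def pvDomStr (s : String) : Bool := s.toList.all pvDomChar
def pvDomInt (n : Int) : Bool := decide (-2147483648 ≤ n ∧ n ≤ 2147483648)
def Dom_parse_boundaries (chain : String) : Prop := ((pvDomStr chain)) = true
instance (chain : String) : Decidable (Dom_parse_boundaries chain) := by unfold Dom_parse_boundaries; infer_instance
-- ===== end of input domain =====

-- B replaces A's char-by-char state machine by a split-based pipeline (truncate at '!', split on '.'/'}', filter); objective: simpler.


-- ===== PORT A =====
-- the for-loop with its two accumulators; returning acc on '!' is the `break` (no final flush)
def pbGo : List Char → List String → List (List String) → List (List String)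
  | [], _, acc => acc
  | c :: cs, cur, acc =>
    if PySem.Chars.isalnum c then pbGo cs (cur ++ [String.mk [c]]) acc
    else if c = '.' ∨ c = '}' then
      if cur ≠ [] then pbGo cs [] (acc ++ [cur]) else pbGo cs cur acc
    else if c = '!' then acc
    else pbGo cs cur acc

def parse_boundaries (chain : String) : List (List String) :=
  pbGo chain.toList [] []

-- ===== PORT B =====
def parse_boundaries_alt (chain : String) : List (List String) :=
  -- prefix = chain.split('!')[0]   (split with a non-empty separator never returns [], so headD is exact)
  let pre := (PySem.Chars.splitOn chain.toList ['!']).headD []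
  -- segments = prefix.replace('}', '.').split('.')
  let segments := PySem.Chars.splitOn (PySem.Chars.replace pre ['}'] ['.']) ['.']
  -- groups = [[c for c in seg if c.isalnum()] for seg in segments[:-1]]
  let groups := segments.dropLast.map (fun seg => (seg.filter PySem.Chars.isalnum).map (fun c => String.mk [c]))
  -- return [g for g in groups if g]
  groups.filter (fun g => !g.isEmpty)

-- ===== PRECONDITION & SPEC =====
def Spec_parse_boundaries (chain : String) (out : List (List String)) : Prop := out = parse_boundaries_alt chain
instance (chain : String) (out : List (List String)) : Decidable (Spec_parse_boundaries chain out) := by unfold Spec_parse_boundaries; infer_instance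

-- ===== CLAIM (what is proved, stated in full; the proofs are below) =====
def Claim_equal_parse_boundaries : Prop := ∀ (chain : String), Dom_parse_boundaries chain → Spec_parse_boundaries chain (parse_boundaries chain)

-- ===== LEMMAS AND PROOFS =====

-- head/tail of Python's str.split on a single-char separator, as an easy recursion
def mySplitP (c : Char) : List Char → List Char × List (List Char)
  | [] => ([], [])
  | x :: xs =>
    let p := mySplitP c xs
    if x = c then ([], p.1 :: p.2) else (x :: p.1, p.2)

def replOne (c : Char) : Char := if c = '}' then '.' else c

def filSeg (seg : List Char) : List String :=
  (seg.filter PySem.Chars.isalnum).map (fun c => String.mk [c])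

-- the groups A produces from a segment list (head g, tail gs), with pending buffer cur; the last segment is never flushed
def groupsOf : List String → List Char → List (List Char) → List (List String)
  | _, _, [] => []
  | cur, g, g' :: gs' => (cur ++ filSeg g) :: groupsOf [] g' gs'

theorem splitOn_go_eq (c : Char) (l : List Char) : ∀ (fuel : Nat) (cur : List Char) (acc : List (List Char)),
    l.length ≤ fuel →
    PySem.Chars.splitOn.go [c] fuel l cur acc
      = acc.reverse ++ (cur.reverse ++ (mySplitP c l).1) :: (mySplitP c l).2 := by
  induction l with
  | nil =>
    intro fuel cur acc _
    cases fuel <;> simp [PySem.Chars.splitOn.go, mySplitP]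
  | cons x xs ih =>
    intro fuel cur acc h
    cases fuel with
    | zero => simp at h
    | succ f =>
      by_cases hx : x = c
      · subst hx
        simp only [PySem.Chars.splitOn.go, List.isPrefixOf, BEq.rfl,
          Bool.and_self, if_true, List.length_cons, List.length_nil, List.drop_succ_cons,
          List.drop_zero]
        rw [ih f [] (cur.reverse :: acc) (by simpa using h)]
        simp [mySplitP]
      · have hb : ([c].isPrefixOf (x :: xs)) = false := by
          simp [List.isPrefixOf]; exact fun h' => absurd h'.symm hx
        simp only [PySem.Chars.splitOn.go, hb, Bool.false_eq_true, if_false]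
        rw [ih f (x :: cur) acc (by simpa using Nat.le_of_succ_le_succ h)]
        simp [mySplitP, hx]

theorem splitOn_eq (c : Char) (l : List Char) :
    PySem.Chars.splitOn l [c] = ((mySplitP c l).1 :: (mySplitP c l).2) := by
  unfold PySem.Chars.splitOn
  rw [splitOn_go_eq c l (l.length + 1) [] [] (Nat.le_succ _)]
  simp

theorem mySplitP_fst_eq (c : Char) (l : List Char) :
    (mySplitP c l).1 = l.takeWhile (fun x => !(x == c)) := by
  induction l with
  | nil => simp [mySplitP]
  | cons x xs ih =>
    by_cases hx : x = c <;> simp [mySplitP, hx, ih]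

theorem replace_go_eq (l : List Char) : ∀ (fuel : Nat) (acc : List Char),
    l.length ≤ fuel →
    PySem.Chars.replace.go ['}'] ['.'] fuel l acc = acc.reverse ++ l.map replOne := by
  induction l with
  | nil =>
    intro fuel acc _
    cases fuel <;> simp [PySem.Chars.replace.go]
  | cons x xs ih =>
    intro fuel acc h
    cases fuel with
    | zero => simp at h
    | succ f =>
      by_cases hx : x = '}'
      · subst hx
        simp only [PySem.Chars.replace.go, List.isPrefixOf, BEq.rfl,
          Bool.and_self, if_true, List.length_cons, List.length_nil, List.drop_succ_cons,
          List.drop_zero, List.reverse_cons, List.reverse_nil, List.nil_append,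
          List.singleton_append]
        rw [ih f ('.' :: acc) (by simpa using Nat.le_of_succ_le_succ h)]
        simp [replOne]
      · have hb : (['}'].isPrefixOf (x :: xs)) = false := by
          simp [List.isPrefixOf]; exact fun h' => absurd h'.symm hx
        simp only [PySem.Chars.replace.go, hb, Bool.false_eq_true, if_false]
        rw [ih f (x :: acc) (by simpa using Nat.le_of_succ_le_succ h)]
        simp [replOne, hx]

theorem replace_eq (l : List Char) :
    PySem.Chars.replace l ['}'] ['.'] = l.map replOne := by
  unfold PySem.Chars.replace
  rw [if_neg (by simp), replace_go_eq l l.length [] le_rfl]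
  simp

theorem dropLast_map_eq_groupsOf (g : List Char) (gs : List (List Char)) :
    ((g :: gs).dropLast).map
        (fun seg => (seg.filter PySem.Chars.isalnum).map (fun c => String.mk [c]))
      = groupsOf [] g gs := by
  induction gs generalizing g with
  | nil => simp [groupsOf]
  | cons g' gs' ih => simp [groupsOf, filSeg, ← ih g', List.dropLast_cons₂]

-- character facts
theorem isalnum_ne (c : Char) (h : PySem.Chars.isalnum c = true) :
    c ≠ '.' ∧ c ≠ '}' ∧ c ≠ '!' := by
  refine ⟨?_, ?_, ?_⟩ <;> rintro rfl <;> revert h <;> decide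

theorem groupsOf_cons_alnum (c : Char) (h : PySem.Chars.isalnum c = true)
    (cur : List String) (g : List Char) (gs : List (List Char)) :
    groupsOf cur (c :: g) gs = groupsOf (cur ++ [String.mk [c]]) g gs := by
  cases gs <;> simp [groupsOf, filSeg, h]

theorem groupsOf_cons_skip (c : Char) (h : PySem.Chars.isalnum c = false)
    (cur : List String) (g : List Char) (gs : List (List Char)) :
    groupsOf cur (c :: g) gs = groupsOf cur g gs := by
  cases gs <;> simp [groupsOf, filSeg, h]

-- abbreviation for B's segment computation on the char list
def segsOf (cs : List Char) : List Char × List (List Char) :=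
  mySplitP '.' ((cs.takeWhile (fun x => !(x == '!'))).map replOne)

-- the master invariant of A's loop
theorem pbGo_eq (cs : List Char) : ∀ (cur : List String) (acc : List (List String)),
    pbGo cs cur acc
      = acc ++ (groupsOf cur (segsOf cs).1 (segsOf cs).2).filter (fun g => !g.isEmpty) := by
  induction cs with
  | nil => intro cur acc; simp [pbGo, segsOf, mySplitP, groupsOf]
  | cons c cs ih =>
    intro cur acc
    by_cases ha : PySem.Chars.isalnum c = true
    · obtain ⟨h1, h2, h3⟩ := isalnum_ne c ha
      have hs : segsOf (c :: cs) = (c :: (segsOf cs).1, (segsOf cs).2) := by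
        simp [segsOf, h3, replOne, h2, mySplitP, h1]
      simp only [pbGo, ha, if_true, hs]
      rw [ih, groupsOf_cons_alnum c ha]
    · have ha' : PySem.Chars.isalnum c = false := by simpa using ha
      by_cases hd : c = '.' ∨ c = '}'
      · have h3 : c ≠ '!' := by rcases hd with rfl | rfl <;> decide
        have hs : segsOf (c :: cs) = ([], (segsOf cs).1 :: (segsOf cs).2) := by
          rcases hd with rfl | rfl <;> simp [segsOf, replOne, mySplitP]
        simp only [pbGo, ha', Bool.false_eq_true, if_false, hd, if_true, hs]
        by_cases hc : cur = []
        · subst hc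
          simp only [ne_eq, not_true_eq_false, if_false]
          rw [ih]
          simp [groupsOf, filSeg]
        · simp only [ne_eq, hc, not_false_eq_true, if_true]
          rw [ih]
          simp [groupsOf, filSeg, hc, List.append_assoc]
      · by_cases hb : c = '!'
        · subst hb
          simp [pbGo, ha', segsOf, mySplitP, groupsOf]
        · have h1 : c ≠ '.' := fun h => hd (Or.inl h)
          have h2 : c ≠ '}' := fun h => hd (Or.inr h)
          have hs : segsOf (c :: cs) = (c :: (segsOf cs).1, (segsOf cs).2) := by
            simp [segsOf, hb, replOne, h2, mySplitP, h1]
          simp only [pbGo, ha', Bool.false_eq_true, if_false, hd, hb]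
          rw [ih, hs, groupsOf_cons_skip c ha']

theorem alt_eq (chain : String) :
    parse_boundaries_alt chain
      = (groupsOf [] (segsOf chain.toList).1 (segsOf chain.toList).2).filter (fun g => !g.isEmpty) := by
  unfold parse_boundaries_alt
  rw [splitOn_eq '!' chain.toList]
  simp only [List.headD_cons]
  rw [mySplitP_fst_eq '!' chain.toList, replace_eq, splitOn_eq '.', dropLast_map_eq_groupsOf]
  rfl

-- ===== VERDICT (by name: the statement is the Claim_ definition above) =====
theorem parse_boundaries_spec : Claim_equal_parse_boundaries := by
  intro chain _
  unfold Spec_parse_boundaries parse_boundaries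
  rw [pbGo_eq, alt_eq]
  rfl
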